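-- pv_equiv track=rewrite | github.com/byuccl/bfasst | scripts/bfasst/compare_waveforms/file_parsing/parse_diff.py | parse_signals
-- ===== SOURCE A (Python) =====
-- def parse_signals(line):
--     words = []
--     newWord = False
--     if "$var wire" in line:
--         word = ""
--         for i in line:
--             if i == " ":
--                 newWord = True
--             if newWord is False:
--                 word = word + i
--             else:
--                 if (word != "$var") & (word != "wire"):
--                     if "[" not in word:
--                         words.append(word)
--                     word = ""
--                     newWord = False
--                 else:
--                     word = ""
--                     newWord = False
--     if "$var reg" in line:
--         word = ""
--         for i in line:
--             if i == " ":
--                 newWord = True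
--             if newWord is False:
--                 word = word + i
--             else:
--                 if (word != "$var") & (word != "reg"):
--                     if "[" not in word:
--                         words.append(word)
--                     word = ""
--                     newWord = False
--                 else:
--                     word = ""
--                     newWord = False
--     return words
-- ===== SOURCE B (Python) =====
-- def parse_signals(line):
--     words = []
--     for kw in ("wire", "reg"):
--         if "$var " + kw in line:
--             words += [w for w in line.split(" ")[:-1]
--                       if w != "$var" and w != kw and "[" not in w]
--     return words
-- ===== Notes on version B (the rewrite author's own statement) =====
-- stated objective: simpler
-- what changed: Replaces the two char-by-char buffer-flush loops with tokenize-then-filter: one loop over the keywords wire/reg that splits the line on single spaces, drops the never-flushed final token (as A does), and filters tokens by a single predicate.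
import Mathlib
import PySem

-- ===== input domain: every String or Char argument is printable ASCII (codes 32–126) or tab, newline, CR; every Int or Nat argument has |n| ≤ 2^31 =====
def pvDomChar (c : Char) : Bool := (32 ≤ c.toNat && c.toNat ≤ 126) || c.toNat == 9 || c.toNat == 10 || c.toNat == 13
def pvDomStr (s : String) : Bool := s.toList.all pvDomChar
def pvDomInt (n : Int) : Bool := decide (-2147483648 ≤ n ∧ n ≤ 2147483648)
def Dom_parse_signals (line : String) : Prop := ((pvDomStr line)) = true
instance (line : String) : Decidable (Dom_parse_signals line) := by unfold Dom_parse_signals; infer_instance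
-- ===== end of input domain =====

-- B replaces A's two char-by-char buffer-flush loops with a single split(" ")[:-1] tokenization
-- filtered by one predicate per keyword block; equal return value on every input (objective: simpler).

-- ===== PORT A =====
-- one iteration of A's char loop; state = (words, word, newWord)
def pvStepA (kw : List Char) (st : List (List Char) × List Char × Bool) (i : Char) :
    List (List Char) × List Char × Bool :=
  let words := st.1
  let word := st.2.1
  let newWord := if i == ' ' then true else st.2.2
  if newWord = false then (words, word ++ [i], newWord)
  else
    if (word != ['$', 'v', 'a', 'r']) && (word != kw) then
      if !PySem.Chars.isIn ['['] word then (words ++ [word], [], false)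
      else (words, [], false)
    else (words, [], false)

def parse_signals (line : String) : List String :=
  let chars := line.toList
  let words0 : List (List Char) := []
  let newWord0 : Bool := false
  let s1 :=
    if PySem.Str.isIn "$var wire" line then
      let r := chars.foldl (pvStepA ['w', 'i', 'r', 'e']) (words0, [], newWord0)
      (r.1, r.2.2)
    else (words0, newWord0)
  let s2 :=
    if PySem.Str.isIn "$var reg" line then
      let r := chars.foldl (pvStepA ['r', 'e', 'g']) (s1.1, [], s1.2)
      (r.1, r.2.2)
    else s1
  s2.1.map String.mk

-- ===== PORT B =====
-- token filter of Source B: w != "$var" and w != kw and "[" not in w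
def pvKeepB (kw : List Char) (w : List Char) : Bool :=
  (w != ['$', 'v', 'a', 'r']) && (w != kw) && !PySem.Chars.isIn ['['] w

def parse_signals_alt (line : String) : List String :=
  (([['w', 'i', 'r', 'e'], ['r', 'e', 'g']].foldl
      (fun words kw =>
        if PySem.Chars.isIn (['$', 'v', 'a', 'r', ' '] ++ kw) line.toList then
          words ++ ((PySem.Chars.splitOn line.toList [' ']).dropLast.filter (pvKeepB kw))
        else words)
      [])).map String.mk

-- ===== PRECONDITION & SPEC =====
def Spec_parse_signals (line : String) (out : List String) : Prop := out = parse_signals_alt line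
instance (line : String) (out : List String) : Decidable (Spec_parse_signals line out) := by unfold Spec_parse_signals; infer_instance

-- ===== CLAIM (what is proved, stated in full; the proofs are below) =====
def Claim_equal_parse_signals : Prop := ∀ (line : String), Dom_parse_signals line → Spec_parse_signals line (parse_signals line)

-- ===== LEMMAS AND PROOFS =====

-- proof-side tokenizer: the words A's buffer loop flushes (the final, never-flushed word dropped)
def pvToks : List Char → List Char → List (List Char)
  | _, [] => []
  | w, c :: cs => if c = ' ' then w :: pvToks [] cs else pvToks (w ++ [c]) cs

-- A's fold produces exactly the pvToks words that pass the filter, and ends with newWord = false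
theorem pvFoldA_spec (kw : List Char) : ∀ (cs : List Char) (w : List Char) (ws : List (List Char)),
    (cs.foldl (pvStepA kw) (ws, w, false)).1 = ws ++ (pvToks w cs).filter (pvKeepB kw) ∧
    (cs.foldl (pvStepA kw) (ws, w, false)).2.2 = false := by
  intro cs
  induction cs with
  | nil => intro w ws; simp [pvToks]
  | cons c cs ih =>
    intro w ws
    by_cases hc : c = ' '
    · subst hc
      have hstep : pvStepA kw (ws, w, false) ' ' =
          (if pvKeepB kw w then ws ++ [w] else ws, [], false) := by
        simp only [pvStepA, pvKeepB]
        by_cases h1 : (w != ['$', 'v', 'a', 'r']) && (w != kw)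
        · by_cases h2 : PySem.Chars.isIn ['['] w <;> simp [h1, h2]
        · simp [h1]
      rw [List.foldl_cons, hstep]
      rcases ih [] (if pvKeepB kw w then ws ++ [w] else ws) with ⟨h1, h2⟩
      refine ⟨?_, h2⟩
      rw [h1]
      by_cases hk : pvKeepB kw w <;> simp [pvToks, hk]
    · have hstep : pvStepA kw (ws, w, false) c = (ws, w ++ [c], false) := by
        simp [pvStepA, hc]
      rw [List.foldl_cons, hstep]
      rcases ih (w ++ [c]) ws with ⟨h1, h2⟩
      exact ⟨by rw [h1]; simp [pvToks, hc], h2⟩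

-- splitOn.go machinery (no library lemmas exist for splitOn's structure)
theorem pvGo_ne_nil : ∀ (fuel : Nat) (l cur : List Char) (acc : List (List Char)),
    PySem.Chars.splitOn.go [' '] fuel l cur acc ≠ [] := by
  intro fuel
  induction fuel with
  | zero => intro l cur acc; simp [PySem.Chars.splitOn.go]
  | succ fuel ih =>
    intro l cur acc
    cases l with
    | nil => simp [PySem.Chars.splitOn.go]
    | cons c rest =>
      rw [PySem.Chars.splitOn.go]
      split
      · exact ih _ _ _
      · exact ih _ _ _

theorem pvGo_acc : ∀ (fuel : Nat) (l cur : List Char) (acc : List (List Char)),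
    l.length < fuel →
    PySem.Chars.splitOn.go [' '] fuel l cur acc =
      acc.reverse ++ PySem.Chars.splitOn.go [' '] fuel l cur [] := by
  intro fuel
  induction fuel with
  | zero => intro l cur acc h; omega
  | succ fuel ih =>
    intro l cur acc h
    cases l with
    | nil => simp [PySem.Chars.splitOn.go]
    | cons c rest =>
      rw [PySem.Chars.splitOn.go, PySem.Chars.splitOn.go]
      simp only [List.length_cons] at h
      split
      · rw [show List.drop [' '].length (c :: rest) = rest from by simp]
        have hr : rest.length < fuel := by omega
        rw [ih rest [] (cur.reverse :: acc) hr, ih rest [] [cur.reverse] hr]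
        simp
      · exact ih _ _ _ (by simpa using h)

theorem pvGo_word : ∀ (w : List Char), ' ' ∉ w → ∀ (cs cur : List Char) (acc : List (List Char)) (fuel : Nat),
    (w ++ cs).length < fuel →
    PySem.Chars.splitOn.go [' '] fuel (w ++ cs) cur acc =
      PySem.Chars.splitOn.go [' '] (fuel - w.length) cs (w.reverse ++ cur) acc := by
  intro w
  induction w with
  | nil => intro _ cs cur acc fuel h; simp
  | cons c w ih =>
    intro hsp cs cur acc fuel h
    cases fuel with
    | zero => simp at h
    | succ f =>
      have hc : c ≠ ' ' := fun hc => hsp (by simp [hc])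
      rw [List.cons_append, PySem.Chars.splitOn.go]
      have hpre : [' '].isPrefixOf (c :: (w ++ cs)) = false := by
        simp [List.isPrefixOf]; exact fun hc' => absurd hc'.symm hc
      rw [if_neg (by simp [hpre])]
      have hsp' : ' ' ∉ w := fun h' => hsp (by simp [h'])
      have hlen : (w ++ cs).length < f := by simp at h ⊢; omega
      rw [ih hsp' cs (c :: cur) acc f hlen]
      simp only [List.length_cons, List.reverse_cons]
      have : f - w.length = f + 1 - (w.length + 1) := by omega
      rw [this]
      simp

-- splitOn on a word with no spaces
theorem pvSplitOn_word (w : List Char) (h : ' ' ∉ w) :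
    PySem.Chars.splitOn w [' '] = [w] := by
  rw [PySem.Chars.splitOn]
  have := pvGo_word w h [] [] [] (w.length + 1) (by simp)
  simp only [List.append_nil] at this
  rw [this]
  have : w.length + 1 - w.length = 1 := by omega
  rw [this]
  simp [PySem.Chars.splitOn.go]

-- splitOn splits off a space-free word at the first space
theorem pvSplitOn_cons (w cs : List Char) (h : ' ' ∉ w) :
    PySem.Chars.splitOn (w ++ ' ' :: cs) [' '] = w :: PySem.Chars.splitOn cs [' '] := by
  rw [PySem.Chars.splitOn]
  have hlen : (w ++ ' ' :: cs).length < (w ++ ' ' :: cs).length + 1 := by omega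
  rw [pvGo_word w h (' ' :: cs) [] [] _ hlen]
  have hf : (w ++ ' ' :: cs).length + 1 - w.length = cs.length + 2 := by simp; omega
  rw [hf]
  rw [PySem.Chars.splitOn.go]
  rw [if_pos (by simp [List.isPrefixOf])]
  rw [show List.drop [' '].length (' ' :: cs) = cs from by simp]
  simp only [List.append_nil, List.reverse_reverse]
  rw [pvGo_acc (cs.length + 1) cs [] [w] (by omega)]
  rw [PySem.Chars.splitOn]
  simp

-- B's tokens = pvToks, for a space-free carried word
theorem pvSplit_toks : ∀ (cs w : List Char), ' ' ∉ w →
    (PySem.Chars.splitOn (w ++ cs) [' ']).dropLast = pvToks w cs := by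
  intro cs
  induction cs with
  | nil => intro w h; rw [List.append_nil, pvSplitOn_word w h]; simp [pvToks]
  | cons c cs ih =>
    intro w h
    by_cases hc : c = ' '
    · subst hc
      rw [pvSplitOn_cons w cs h]
      have hne : PySem.Chars.splitOn cs [' '] ≠ [] := by
        rw [PySem.Chars.splitOn]; exact pvGo_ne_nil _ _ _ _
      rw [List.dropLast_cons_of_ne_nil hne]
      rw [show PySem.Chars.splitOn cs [' '] = PySem.Chars.splitOn ([] ++ cs) [' '] by simp]
      rw [ih [] (by simp)]
      simp [pvToks]
    · have : w ++ c :: cs = (w ++ [c]) ++ cs := by simp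
      rw [this, ih (w ++ [c]) (by simp [h]; exact fun h' => hc h'.symm)]
      simp [pvToks, hc]

-- guard literals
theorem pvGuard_wire (line : String) :
    PySem.Str.isIn "$var wire" line =
      PySem.Chars.isIn ['$', 'v', 'a', 'r', ' ', 'w', 'i', 'r', 'e'] line.toList := by
  simp [PySem.Str.isIn]

theorem pvGuard_reg (line : String) :
    PySem.Str.isIn "$var reg" line =
      PySem.Chars.isIn ['$', 'v', 'a', 'r', ' ', 'r', 'e', 'g'] line.toList := by
  simp [PySem.Str.isIn]

-- one block of A = one block of B
theorem pvBlock (kw : List Char) (line : String) (ws : List (List Char)) :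
    (line.toList.foldl (pvStepA kw) (ws, [], false)).1 =
      ws ++ (PySem.Chars.splitOn line.toList [' ']).dropLast.filter (pvKeepB kw) ∧
    (line.toList.foldl (pvStepA kw) (ws, [], false)).2.2 = false := by
  rcases pvFoldA_spec kw line.toList [] ws with ⟨h1, h2⟩
  refine ⟨?_, h2⟩
  rw [h1]
  have ht := pvSplit_toks line.toList [] (by simp)
  simp only [List.nil_append] at ht
  rw [ht]

-- ===== VERDICT (by name: the statement is the Claim_ definition above) =====
theorem parse_signals_spec : Claim_equal_parse_signals := by
  intro line _
  unfold Spec_parse_signals parse_signals parse_signals_alt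
  simp only [List.foldl_cons, List.foldl_nil, List.cons_append, List.nil_append]
  rw [pvGuard_wire, pvGuard_reg]
  by_cases h1 : PySem.Chars.isIn ['$', 'v', 'a', 'r', ' ', 'w', 'i', 'r', 'e'] line.toList = true
  · rcases pvBlock ['w', 'i', 'r', 'e'] line [] with ⟨hw1, hw2⟩
    simp only [List.nil_append] at hw1
    by_cases h2 : PySem.Chars.isIn ['$', 'v', 'a', 'r', ' ', 'r', 'e', 'g'] line.toList = true
    · rcases pvBlock ['r', 'e', 'g'] line
        ((PySem.Chars.splitOn line.toList [' ']).dropLast.filter (pvKeepB ['w', 'i', 'r', 'e'])) with ⟨hr1, _⟩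
      simp [h1, h2, hw1, hw2, hr1]
    · simp [h1, h2, hw1]
  · by_cases h2 : PySem.Chars.isIn ['$', 'v', 'a', 'r', ' ', 'r', 'e', 'g'] line.toList = true
    · rcases pvBlock ['r', 'e', 'g'] line [] with ⟨hr1, _⟩
      simp only [List.nil_append] at hr1
      simp [h1, h2, hr1]
    · simp [h1, h2]
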